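-- pv_equiv track=rewrite | github.com/EmilioPeJu/problems | aoc23_day14_1.py | calculate_column
-- ===== SOURCE A (Python) =====
-- def calculate_column(column):
--     res = 0
--     last = 0
--     for i, c in enumerate(column):
--         if c == '#':
--             last = i + 1
--         elif c == 'O':
--             res += len(column) - last
--             last += 1
--
--     return res
-- ===== SOURCE B (Python) =====
-- def calculate_column(column):
--     # Phase 1: roll the rocks -- split on '#', move every 'O' to the front of its
--     # segment, pad with '.', and reassemble the rolled column.
--     segments = column.split('#')
--     rolled = '#'.join('O' * seg.count('O') + '.' * (len(seg) - seg.count('O'))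
--                       for seg in segments)
--     # Phase 2: measure the load of the rolled column.
--     return sum(len(rolled) - i for i, c in enumerate(rolled) if c == 'O')
-- ===== Notes on version B (the rewrite author's own statement) =====
-- stated objective: alternative
-- what changed: A's single fused loop accumulating the load while tracking the last landing slot is replaced by a two-phase build-then-measure structure: split the column on '#', physically roll each segment's 'O's to the front and rejoin, then sum len-i over the 'O' positions of the rolled column in a separate pass.
import Mathlib
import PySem

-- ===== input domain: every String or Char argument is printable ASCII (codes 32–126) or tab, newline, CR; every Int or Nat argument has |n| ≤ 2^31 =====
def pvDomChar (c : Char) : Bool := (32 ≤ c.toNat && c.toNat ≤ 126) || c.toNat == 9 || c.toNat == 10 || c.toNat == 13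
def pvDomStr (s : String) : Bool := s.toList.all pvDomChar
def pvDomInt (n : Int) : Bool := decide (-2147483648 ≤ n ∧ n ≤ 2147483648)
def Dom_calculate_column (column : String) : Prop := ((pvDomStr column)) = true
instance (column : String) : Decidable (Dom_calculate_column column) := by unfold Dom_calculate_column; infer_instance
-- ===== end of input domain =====

-- B replaces A's fused accumulator loop by a two-phase build-then-measure decomposition
-- (split the column on '#', roll the 'O's to the front of each segment, rejoin, then sum
-- the loads of the rolled column in a separate pass); objective: alternative, same cost.

-- ===== PORT A =====
-- literal port of A: one fold over enumerate(column) carrying the state (res, last)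
def calculate_column (column : String) : Int :=
  ((PySem.List.enumerate column.toList 0).foldl
    (fun (st : Int × Int) (ic : Int × Char) =>
      if ic.2 = '#' then (st.1, ic.1 + 1)
      else if ic.2 = 'O' then (st.1 + ((column.toList.length : Int) - st.2), st.2 + 1)
      else st) (0, 0)).1

-- ===== PORT B =====
-- port of Source B's 'O' * seg.count('O') + '.' * (len(seg) - seg.count('O')) for one segment
def pvRollSeg (seg : List Char) : List Char :=
  List.replicate (seg.count 'O') 'O' ++ List.replicate (seg.length - seg.count 'O') '.'

-- hand port of Python's column.split('#') (str.split with a one-char separator; exact)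
def pvSplitHash : List Char → List (List Char)
  | [] => [[]]
  | c :: cs =>
    match pvSplitHash cs with
    | s :: rest => if c = '#' then [] :: s :: rest else (c :: s) :: rest
    | [] => [[c]]  -- unreachable: pvSplitHash never returns []

-- phase 1: split on '#', roll each segment, rejoin with '#' (List.intercalate = '#'.join);
-- phase 2: fold over enumerate(rolled) summing len(rolled) - i at each 'O'
def calculate_column_alt (column : String) : Int :=
  let rolled := List.intercalate ['#'] ((pvSplitHash column.toList).map pvRollSeg)
  (PySem.List.enumerate rolled 0).foldl
    (fun (acc : Int) (ic : Int × Char) =>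
      if ic.2 = 'O' then acc + ((rolled.length : Int) - ic.1) else acc) 0

-- ===== PRECONDITION & SPEC =====
def Spec_calculate_column (column : String) (out : Int) : Prop := out = calculate_column_alt column
instance (column : String) (out : Int) : Decidable (Spec_calculate_column column out) := by unfold Spec_calculate_column; infer_instance

-- ===== CLAIM (what is proved, stated in full; the proofs are below) =====
def Claim_equal_calculate_column : Prop := ∀ (column : String), Dom_calculate_column column → Spec_calculate_column column (calculate_column column)

-- ===== LEMMAS AND PROOFS =====

-- A's loop, written as a recursion: remaining chars, current index i, current `last`
def pvGA (n : Int) : List Char → Int → Int → Int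
  | [], _, _ => 0
  | c :: cs, i, last =>
    if c = '#' then pvGA n cs (i + 1) (i + 1)
    else if c = 'O' then (n - last) + pvGA n cs (i + 1) (last + 1)
    else pvGA n cs (i + 1) last

-- B's load sum, written as a recursion over the rolled list with its start index
def pvLd (n : Int) : List Char → Int → Int
  | [], _ => 0
  | c :: cs, i => (if c = 'O' then n - i else 0) + pvLd n cs (i + 1)

def pvRollAll (cs : List Char) : List Char :=
  List.intercalate ['#'] ((pvSplitHash cs).map pvRollSeg)

theorem pvGA_fold (n : Int) (cs : List Char) : ∀ (i res last : Int),
    ((PySem.List.enumerate cs i).foldl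
      (fun (st : Int × Int) (ic : Int × Char) =>
        if ic.2 = '#' then (st.1, ic.1 + 1)
        else if ic.2 = 'O' then (st.1 + (n - st.2), st.2 + 1)
        else st) (res, last)).1 = res + pvGA n cs i last := by
  induction cs with
  | nil => intro i res last; simp [PySem.List.enumerate_nil, pvGA]
  | cons c cs ih =>
    intro i res last
    rw [PySem.List.enumerate_cons, List.foldl_cons]
    by_cases h1 : c = '#'
    · simp [pvGA, h1, ih]
    · by_cases h2 : c = 'O'
      · simp [pvGA, h2, ih]; ring
      · simp [pvGA, h1, h2, ih]

theorem pvLd_fold (n : Int) (cs : List Char) : ∀ (i acc : Int),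
    ((PySem.List.enumerate cs i).foldl
      (fun (acc : Int) (ic : Int × Char) =>
        if ic.2 = 'O' then acc + (n - ic.1) else acc) acc) = acc + pvLd n cs i := by
  induction cs with
  | nil => intro i acc; simp [PySem.List.enumerate_nil, pvLd]
  | cons c cs ih =>
    intro i acc
    rw [PySem.List.enumerate_cons, List.foldl_cons]
    by_cases h : c = 'O'
    · simp [pvLd, h, ih]; ring
    · simp [pvLd, h, ih]

theorem pvLd_append (n : Int) (xs : List Char) : ∀ (ys : List Char) (i : Int),
    pvLd n (xs ++ ys) i = pvLd n xs i + pvLd n ys (i + xs.length) := by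
  induction xs with
  | nil => intro ys i; simp [pvLd]
  | cons c cs ih =>
    intro ys i
    simp only [List.cons_append, pvLd, ih, List.length_cons]
    push_cast; ring_nf

theorem pvLd_replicate_dot (n : Int) (d : Nat) : ∀ (i : Int), pvLd n (List.replicate d '.') i = 0 := by
  induction d with
  | zero => intro i; simp [pvLd]
  | succ d ih => intro i; simp [List.replicate_succ, pvLd, ih]

theorem pvSplitHash_ne_nil (cs : List Char) : pvSplitHash cs ≠ [] := by
  cases cs with
  | nil => simp [pvSplitHash]
  | cons c cs =>
    simp only [pvSplitHash]
    cases h : pvSplitHash cs with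
    | nil => simp
    | cons s rest => by_cases hc : c = '#' <;> simp [hc]

theorem pvSplitHash_no_hash (cs : List Char) (h : '#' ∉ cs) : pvSplitHash cs = [cs] := by
  induction cs with
  | nil => rfl
  | cons c cs ih =>
    have hc : c ≠ '#' := fun hh => h (hh ▸ List.mem_cons_self)
    have h2 : pvSplitHash cs = [cs] := ih (fun hm => h (List.mem_cons_of_mem _ hm))
    simp [pvSplitHash, h2, hc]

theorem pvSplitHash_seg (seg : List Char) (h : '#' ∉ seg) (rest : List Char) :
    pvSplitHash (seg ++ '#' :: rest) = seg :: pvSplitHash rest := by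
  induction seg with
  | nil =>
    simp only [List.nil_append, pvSplitHash]
    cases hr : pvSplitHash rest with
    | nil => exact absurd hr (pvSplitHash_ne_nil rest)
    | cons s t => simp
  | cons c cs ih =>
    have hc : c ≠ '#' := fun hh => h (hh ▸ List.mem_cons_self)
    have h2 := ih (fun hm => h (List.mem_cons_of_mem _ hm))
    simp [pvSplitHash, h2, hc]

theorem pvIntercalate_cons_cons (a b : List Char) (l : List (List Char)) :
    List.intercalate ['#'] (a :: b :: l) = a ++ '#' :: List.intercalate ['#'] (b :: l) := by
  simp [List.intercalate, List.intersperse]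

theorem pvRollAll_seg (seg : List Char) (h : '#' ∉ seg) (rest : List Char) :
    pvRollAll (seg ++ '#' :: rest) = pvRollSeg seg ++ '#' :: pvRollAll rest := by
  unfold pvRollAll
  rw [pvSplitHash_seg seg h rest]
  obtain ⟨s, t, hst⟩ : ∃ s t, pvSplitHash rest = s :: t := by
    cases hr : pvSplitHash rest with
    | nil => exact absurd hr (pvSplitHash_ne_nil rest)
    | cons s t => exact ⟨s, t, rfl⟩
  rw [hst]
  simp only [List.map_cons]
  exact pvIntercalate_cons_cons _ _ _

theorem pvRollAll_no_hash (cs : List Char) (h : '#' ∉ cs) : pvRollAll cs = pvRollSeg cs := by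
  unfold pvRollAll
  rw [pvSplitHash_no_hash cs h]
  simp [List.intercalate]

theorem pvRollSeg_length (seg : List Char) : (pvRollSeg seg).length = seg.length := by
  have := List.count_le_length (l := seg) (a := 'O')
  simp [pvRollSeg]; omega

theorem pvLd_rollSeg (n : Int) (seg : List Char) (i : Int) :
    pvLd n (pvRollSeg seg) i = pvLd n (List.replicate (seg.count 'O') 'O') i := by
  unfold pvRollSeg
  rw [pvLd_append, pvLd_replicate_dot]
  ring

theorem pvGA_seg (n : Int) (seg : List Char) (h : '#' ∉ seg) : ∀ (rest : List Char) (i last : Int),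
    pvGA n (seg ++ rest) i last
      = pvLd n (List.replicate (seg.count 'O') 'O') last
        + pvGA n rest (i + (seg.length : Int)) (last + (seg.count 'O' : Int)) := by
  induction seg with
  | nil => intro rest i last; simp [pvLd]
  | cons c cs ih =>
    have hc : c ≠ '#' := fun hh => h (hh ▸ List.mem_cons_self)
    have ih' := ih (fun hm => h (List.mem_cons_of_mem _ hm))
    intro rest i last
    by_cases h2 : c = 'O'
    · subst h2
      simp only [List.cons_append, pvGA, if_neg hc, ih', List.count_cons_self,
        List.replicate_succ, pvLd, List.length_cons]
      push_cast; ring_nf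
    · simp only [List.cons_append, pvGA, if_neg hc, if_neg h2, ih',
        List.length_cons, List.count_cons]
      simp only [beq_iff_eq, if_neg h2, Nat.add_zero]
      push_cast; ring_nf

def pvNotHash (c : Char) : Bool := !(c == '#')

theorem pvDropWhile_head {α : Type} (p : α → Bool) : ∀ (l : List α) (c : α) (cs : List α),
    List.dropWhile p l = c :: cs → p c = false := by
  intro l
  induction l with
  | nil => intro c cs h; simp [List.dropWhile] at h
  | cons a l ih =>
    intro c cs h
    by_cases ha : p a
    · rw [List.dropWhile_cons_of_pos ha] at h; exact ih c cs h
    · rw [List.dropWhile_cons_of_neg ha] at h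
      cases h; simpa using ha

theorem pvRollAll_length : ∀ (m : Nat) (cs : List Char), cs.length ≤ m →
    (pvRollAll cs).length = cs.length := by
  intro m
  induction m with
  | zero =>
    intro cs hl
    cases cs with
    | nil => rfl
    | cons c cs => simp at hl
  | succ m ih =>
    intro cs hl
    have hseg : '#' ∉ cs.takeWhile pvNotHash := by
      intro hm
      have := List.mem_takeWhile_imp hm
      simp [pvNotHash] at this
    cases hd : cs.dropWhile pvNotHash with
    | nil =>
      have hcs : cs.takeWhile pvNotHash = cs := by
        have := List.takeWhile_append_dropWhile (p := pvNotHash) (l := cs)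
        rw [hd, List.append_nil] at this; exact this
      have hno : '#' ∉ cs := hcs ▸ hseg
      rw [pvRollAll_no_hash cs hno, pvRollSeg_length]
    | cons c rest =>
      have hc : c = '#' := by
        have := pvDropWhile_head pvNotHash cs c rest hd
        simpa [pvNotHash] using this
      subst hc
      have hcs : cs.takeWhile pvNotHash ++ '#' :: rest = cs := by
        rw [← hd]; exact List.takeWhile_append_dropWhile
      have hlen : rest.length ≤ m := by
        have := congrArg List.length hcs
        simp at this; omega
      rw [← hcs, pvRollAll_seg _ hseg]
      simp only [List.length_append, List.length_cons, pvRollSeg_length, ih rest hlen]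

theorem pvGA_eq_ld (n : Int) : ∀ (m : Nat) (cs : List Char), cs.length ≤ m → ∀ (i : Int),
    pvGA n cs i i = pvLd n (pvRollAll cs) i := by
  intro m
  induction m with
  | zero =>
    intro cs hl i
    cases cs with
    | nil => rfl
    | cons c cs => simp at hl
  | succ m ih =>
    intro cs hl i
    have hseg : '#' ∉ cs.takeWhile pvNotHash := by
      intro hm
      have := List.mem_takeWhile_imp hm
      simp [pvNotHash] at this
    cases hd : cs.dropWhile pvNotHash with
    | nil =>
      have hcs : cs.takeWhile pvNotHash = cs := by
        have := List.takeWhile_append_dropWhile (p := pvNotHash) (l := cs)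
        rw [hd, List.append_nil] at this; exact this
      have hno : '#' ∉ cs := hcs ▸ hseg
      have hGA : pvGA n cs i i = pvLd n (List.replicate (cs.count 'O') 'O') i := by
        have := pvGA_seg n cs hno [] i i
        simpa [pvGA] using this
      rw [hGA, pvRollAll_no_hash cs hno, pvLd_rollSeg]
    | cons c rest =>
      have hc : c = '#' := by
        have := pvDropWhile_head pvNotHash cs c rest hd
        simpa [pvNotHash] using this
      subst hc
      have hcs : cs.takeWhile pvNotHash ++ '#' :: rest = cs := by
        rw [← hd]; exact List.takeWhile_append_dropWhile
      have hlen : rest.length ≤ m := by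
        have := congrArg List.length hcs
        simp at this; omega
      rw [← hcs, pvGA_seg n _ hseg, pvRollAll_seg _ hseg, pvLd_append, pvRollSeg_length]
      simp only [pvGA, pvLd, pvLd_rollSeg]
      rw [ih rest hlen]
      push_cast; ring_nf

-- ===== VERDICT (by name: the statement is the Claim_ definition above) =====
theorem calculate_column_spec : Claim_equal_calculate_column := by
  intro column _
  unfold Spec_calculate_column
  simp only [calculate_column, calculate_column_alt]
  rw [pvGA_fold, pvLd_fold]
  rw [show (List.intercalate ['#'] ((pvSplitHash column.toList).map pvRollSeg)) = pvRollAll column.toList from rfl]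
  rw [pvRollAll_length column.toList.length column.toList le_rfl]
  rw [pvGA_eq_ld ((column.toList.length : Int)) column.toList.length column.toList le_rfl 0]
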